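-- pv_equiv track=rewrite | github.com/nyan-dot/wiki-cli | src/wiki_cli/sep.py | rewrite_related_entries_section
-- ===== SOURCE A (Python) =====
-- def rewrite_related_entries_section(lines: list[str]) -> list[str]:
--     rebuilt: list[str] = []
--     index = 0
--
--     while index < len(lines):
--         line = lines[index]
--         rebuilt.append(line)
--
--         if line == "## Related Entries":
--             index += 1
--             section_lines: list[str] = []
--             while index < len(lines) and not lines[index].startswith("#"):
--                 section_lines.append(lines[index])
--                 index += 1
--
--             nonempty = [item.strip() for item in section_lines if item.strip()]
--             related_blob = " ".join(nonempty)
--             if " | " in related_blob: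
--                 rebuilt.append("")
--                 rebuilt.extend(
--                     f"- {entry.strip()}"
--                     for entry in related_blob.split(" | ")
--                     if entry.strip()
--                 )
--                 if index < len(lines) and lines[index].startswith("#"):
--                     rebuilt.append("")
--             else:
--                 rebuilt.extend(section_lines)
--             continue
--
--         index += 1
--
--     return rebuilt
-- ===== SOURCE B (Python) =====
-- def _segments(lines):
--     segs = []
--     header = None
--     body = []
--     for line in lines:
--         if line.startswith("#"):
--             segs.append((header, body))
--             header = line
--             body = []
--         else:
--             body.append(line)
--     segs.append((header, body))
--     return segs
--
--
-- def _render(segs):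
--     out = []
--     for i, (header, body) in enumerate(segs):
--         if header is not None:
--             out.append(header)
--         if header == "## Related Entries":
--             blob = " ".join(item.strip() for item in body if item.strip())
--             if " | " in blob:
--                 out.append("")
--                 out.extend("- " + e.strip() for e in blob.split(" | ") if e.strip())
--                 if i != len(segs) - 1:
--                     out.append("")
--                 continue
--         out.extend(body)
--     return out
--
--
-- def rewrite_related_entries_section(lines):
--     return _render(_segments(lines))
-- ===== Notes on version B (the rewrite author's own statement) =====
-- stated objective: alternative
-- what changed: B replaces A's single index-driven while loop with nested section scanning by a two-phase pipeline: first partition the lines into (header, body) segments, then render each segment, rewriting the 'Related Entries' segments.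
import Mathlib
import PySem

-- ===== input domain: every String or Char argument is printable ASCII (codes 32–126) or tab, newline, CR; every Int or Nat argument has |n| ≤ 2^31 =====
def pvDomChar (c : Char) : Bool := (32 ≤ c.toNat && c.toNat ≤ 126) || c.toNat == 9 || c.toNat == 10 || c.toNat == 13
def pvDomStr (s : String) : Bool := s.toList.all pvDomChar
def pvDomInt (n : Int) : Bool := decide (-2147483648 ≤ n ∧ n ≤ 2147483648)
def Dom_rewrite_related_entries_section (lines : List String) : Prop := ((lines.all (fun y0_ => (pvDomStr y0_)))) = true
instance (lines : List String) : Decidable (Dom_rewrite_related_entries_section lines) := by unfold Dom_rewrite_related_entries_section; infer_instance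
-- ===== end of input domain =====

-- B rewrites A's single index-driven while loop (with a nested inner scan) as a two-phase
-- pipeline: segment the lines at '#' headers, then render each segment (objective: alternative).

-- ===== PORT A =====
-- A's outer while loop becomes recursion on the list; the inner while loop collecting
-- section_lines becomes takeWhile/dropWhile over the same predicate.
def rewrite_related_entries_section (lines : List String) : List String :=
  match lines with
  | [] => []
  | line :: rest =>
    if line = "## Related Entries" then
      let section_lines := rest.takeWhile (fun l => !(PySem.Str.startswith l "#"))
      let rest' := rest.dropWhile (fun l => !(PySem.Str.startswith l "#"))
      let nonempty := (section_lines.filter (fun item => PySem.Str.strip item ≠ "")).map PySem.Str.strip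
      let related_blob := PySem.Str.join " " nonempty
      if PySem.Str.isIn " | " related_blob then
        line :: "" ::
          (((PySem.Str.split? related_blob " | ").getD []).filter (fun e => PySem.Str.strip e ≠ "")).map
            (fun e => "- " ++ PySem.Str.strip e)
          ++ (match rest' with
              | [] => []
              | next :: _ => if PySem.Str.startswith next "#" then [""] else [])
          ++ rewrite_related_entries_section rest'
      else
        line :: section_lines ++ rewrite_related_entries_section rest'
    else
      line :: rewrite_related_entries_section rest
termination_by lines.length
decreasing_by
  · exact Nat.lt_succ_of_le (List.length_dropWhile_le _ _)
  · exact Nat.lt_succ_of_le (List.length_dropWhile_le _ _)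
  · simp

-- ===== PORT B =====
-- Phase 1 of Source B: one fold accumulating (segs, header, body); a '#' line closes the
-- current segment and opens a new one.
def pvSegStep (st : List (Option String × List String) × Option String × List String)
    (line : String) : List (Option String × List String) × Option String × List String :=
  if PySem.Str.startswith line "#" then (st.1 ++ [(st.2.1, st.2.2)], some line, [])
  else (st.1, st.2.1, st.2.2 ++ [line])

def pvSegments (lines : List String) : List (Option String × List String) :=
  let st := lines.foldl pvSegStep ([], none, [])
  st.1 ++ [(st.2.1, st.2.2)]

-- Phase 2 of Source B: render each segment; "i != len(segs) - 1" becomes "rest ≠ []".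
def pvRender (segs : List (Option String × List String)) : List String :=
  match segs with
  | [] => []
  | (header, body) :: rest =>
    let head := match header with | some h => [h] | none => []
    if header = some "## Related Entries" then
      let blob := PySem.Str.join " "
        ((body.filter (fun item => PySem.Str.strip item ≠ "")).map PySem.Str.strip)
      if PySem.Str.isIn " | " blob then
        head ++ [""]
          ++ (((PySem.Str.split? blob " | ").getD []).filter (fun e => PySem.Str.strip e ≠ "")).map
               (fun e => "- " ++ PySem.Str.strip e)
          ++ (if rest = [] then [] else [""])
          ++ pvRender rest
      else head ++ body ++ pvRender rest
    else head ++ body ++ pvRender rest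

def rewrite_related_entries_section_alt (lines : List String) : List String :=
  pvRender (pvSegments lines)

-- ===== PRECONDITION & SPEC =====
def Spec_rewrite_related_entries_section (lines : List String) (out : List String) : Prop := out = rewrite_related_entries_section_alt lines
instance (lines : List String) (out : List String) : Decidable (Spec_rewrite_related_entries_section lines out) := by unfold Spec_rewrite_related_entries_section; infer_instance

-- ===== CLAIM (what is proved, stated in full; the proofs are below) =====
def Claim_equal_rewrite_related_entries_section : Prop := ∀ (lines : List String), Dom_rewrite_related_entries_section lines → Spec_rewrite_related_entries_section lines (rewrite_related_entries_section lines)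

-- ===== LEMMAS AND PROOFS =====

-- the recursive shape of B's segmentation (tail part: input empty or starting with '#')
def pvTailSegs (ls : List String) : List (Option String × List String) :=
  match ls with
  | [] => []
  | h :: t =>
    (some h, t.takeWhile (fun l => !(PySem.Str.startswith l "#"))) ::
      pvTailSegs (t.dropWhile (fun l => !(PySem.Str.startswith l "#")))
termination_by ls.length
decreasing_by exact Nat.lt_succ_of_le (List.length_dropWhile_le _ _)

theorem pv_head_dropWhile {α : Type} (p : α → Bool) (l : List α) (x : α) (xs : List α)
    (h : l.dropWhile p = x :: xs) : p x = false := by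
  induction l with
  | nil => simp at h
  | cons a t ih =>
    by_cases hp : p a
    · exact ih (by simpa [List.dropWhile, hp] using h)
    · simp only [List.dropWhile, hp] at h
      rw [show a = x from (List.cons.injEq ..).mp h |>.1] at hp
      simpa using hp

theorem pv_RE_starts_hash : PySem.Str.startswith "## Related Entries" "#" = true := by decide

-- step lemma: the fold's accumulated segs only ever grows by appending
theorem pv_fold_prefix (t : List String)
    (segs : List (Option String × List String)) (hdr : Option String) (body : List String) :
    t.foldl pvSegStep (segs, hdr, body)
    = (segs ++ (t.foldl pvSegStep ([], hdr, body)).1,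
       (t.foldl pvSegStep ([], hdr, body)).2) := by
  induction t generalizing segs hdr body with
  | nil => simp
  | cons l t ih =>
    by_cases hl : PySem.Str.startswith l "#"
    · simp only [List.foldl_cons, pvSegStep, hl, ite_true, List.nil_append]
      rw [ih (segs ++ [(hdr, body)]), ih [(hdr, body)]]
      simp
    · simp only [List.foldl_cons, pvSegStep, hl, Bool.false_eq_true, ite_false, List.nil_append]
      rw [ih segs]

-- the fold, finalized, equals body-extension followed by pvTailSegs
theorem pv_fold_spec (ls : List String) (hdr : Option String) (body : List String) :
    (fun st : List (Option String × List String) × Option String × List String =>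
        st.1 ++ [(st.2.1, st.2.2)])
      (ls.foldl pvSegStep ([], hdr, body))
    = (hdr, body ++ ls.takeWhile (fun l => !(PySem.Str.startswith l "#"))) ::
        pvTailSegs (ls.dropWhile (fun l => !(PySem.Str.startswith l "#"))) := by
  induction ls generalizing hdr body with
  | nil => simp [pvTailSegs]
  | cons l t ih =>
    by_cases hl : PySem.Str.startswith l "#"
    · simp only [List.foldl_cons, pvSegStep, hl, ite_true, List.nil_append]
      rw [pv_fold_prefix t [(hdr, body)] (some l) []]
      have := ih (some l) ([] : List String)
      simp only at this
      simp only [List.takeWhile, List.dropWhile, hl, Bool.not_true]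
      rw [pvTailSegs]
      simpa using this
    · simp only [List.foldl_cons, pvSegStep, hl, Bool.false_eq_true, ite_false, List.nil_append]
      rw [show (List.foldl pvSegStep ([], hdr, body ++ [l]) t).1 ++
            [((List.foldl pvSegStep ([], hdr, body ++ [l]) t).2.1,
              (List.foldl pvSegStep ([], hdr, body ++ [l]) t).2.2)]
          = (fun st : List (Option String × List String) × Option String × List String =>
              st.1 ++ [(st.2.1, st.2.2)]) (List.foldl pvSegStep ([], hdr, body ++ [l]) t) from rfl,
          ih hdr (body ++ [l])]
      have hb : PySem.Chars.startswith l.toList ['#'] = false := by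
        simpa using hl
      simp [List.takeWhile, List.dropWhile, hb]

theorem pv_segments_eq (lines : List String) :
    pvSegments lines
    = (none, lines.takeWhile (fun l => !(PySem.Str.startswith l "#"))) ::
        pvTailSegs (lines.dropWhile (fun l => !(PySem.Str.startswith l "#"))) := by
  have := pv_fold_spec lines none []
  simpa [pvSegments] using this

-- lines that do not start with '#' pass straight through A
theorem pv_A_skip (b : List String) (rest : List String)
    (hb : ∀ l ∈ b, PySem.Str.startswith l "#" = false) :
    rewrite_related_entries_section (b ++ rest)
      = b ++ rewrite_related_entries_section rest := by
  induction b with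
  | nil => simp
  | cons l t ih =>
    have hl : PySem.Str.startswith l "#" = false := hb l (by simp)
    have hne : l ≠ "## Related Entries" := by
      intro h; rw [h] at hl; rw [pv_RE_starts_hash] at hl; simp at hl
    rw [List.cons_append, rewrite_related_entries_section]
    simp only [hne, ite_false]
    rw [ih (fun x hx => hb x (by simp [hx]))]
    simp

-- main lemma: on a suffix that is empty or starts with '#', render∘tailSegs = A
theorem pv_main (r : List String)
    (hr : r = [] ∨ ∃ h t, r = h :: t ∧ PySem.Str.startswith h "#" = true) :
    pvRender (pvTailSegs r) = rewrite_related_entries_section r := by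
  induction hn : r.length using Nat.strong_induction_on generalizing r with
  | _ n ih =>
  rcases hr with rfl | ⟨h, t, rfl, hh⟩
  · simp [pvTailSegs, pvRender, rewrite_related_entries_section]
  · rw [pvTailSegs, pvRender]
    set tw := t.takeWhile (fun l => !(PySem.Str.startswith l "#")) with htw
    set dw := t.dropWhile (fun l => !(PySem.Str.startswith l "#")) with hdw
    have htwall : ∀ l ∈ tw, PySem.Str.startswith l "#" = false := by
      intro l hl
      have := List.mem_takeWhile_imp hl
      simpa using this
    have hdwlen : dw.length < n := by
      rw [← hn]; simp only [List.length_cons]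
      exact Nat.lt_succ_of_le (List.length_dropWhile_le _ _)
    have hdwshape : dw = [] ∨ ∃ h' t', dw = h' :: t' ∧ PySem.Str.startswith h' "#" = true := by
      cases hcase : dw with
      | nil => left; rfl
      | cons h' t' =>
        right; refine ⟨h', t', rfl, ?_⟩
        have := pv_head_dropWhile _ t h' t' (by rw [← hdw, hcase])
        simpa using this
    have hihdw : pvRender (pvTailSegs dw) = rewrite_related_entries_section dw :=
      ih dw.length hdwlen dw hdwshape rfl
    by_cases hre : h = "## Related Entries"
    · subst hre
      rw [rewrite_related_entries_section]
      rw [← htw, ← hdw]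
      rw [if_pos rfl, if_pos rfl]
      by_cases hp : PySem.Str.isIn " | "
          (PySem.Str.join " " ((tw.filter (fun item => PySem.Str.strip item ≠ "")).map PySem.Str.strip)) = true
      · rw [if_pos hp, if_pos hp, hihdw]
        rcases hdwshape with hdw0 | ⟨h', t', hdw', hh'⟩
        · rw [hdw0]
          simp [pvTailSegs, rewrite_related_entries_section]
        · rw [hdw']
          have hne' : pvTailSegs (h' :: t') ≠ [] := by rw [pvTailSegs]; simp
          have hh'' : PySem.Chars.startswith h'.toList ['#'] = true := by simpa using hh'
          simp [hne', hh'']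
      · rw [if_neg hp, if_neg hp, hihdw]
        simp
    · have hne : (some h : Option String) ≠ some "## Related Entries" := by
        simpa using hre
      rw [rewrite_related_entries_section]
      simp only [hre, ite_false, if_neg hne]
      have ht : t = tw ++ dw := (List.takeWhile_append_dropWhile (l := t) (p := _)).symm
      rw [show rewrite_related_entries_section t
            = tw ++ rewrite_related_entries_section dw by
          conv_lhs => rw [ht]
          exact pv_A_skip tw dw htwall]
      rw [hihdw]
      simp

-- ===== VERDICT (by name: the statement is the Claim_ definition above) =====
theorem rewrite_related_entries_section_spec : Claim_equal_rewrite_related_entries_section := by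
  intro lines _
  unfold Spec_rewrite_related_entries_section rewrite_related_entries_section_alt
  rw [pv_segments_eq, pvRender]
  have hnone : (none : Option String) ≠ some "## Related Entries" := by simp
  simp only [if_neg hnone]
  rw [pv_main (lines.dropWhile (fun l => !(PySem.Str.startswith l "#")))]
  · have htwall : ∀ l ∈ lines.takeWhile (fun l => !(PySem.Str.startswith l "#")),
        PySem.Str.startswith l "#" = false := by
      intro l hl; simpa using List.mem_takeWhile_imp hl
    have hA : rewrite_related_entries_section lines
        = lines.takeWhile (fun l => !(PySem.Str.startswith l "#"))
          ++ rewrite_related_entries_section (lines.dropWhile (fun l => !(PySem.Str.startswith l "#"))) := by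
      conv_lhs => rw [← List.takeWhile_append_dropWhile
        (p := fun l => !(PySem.Str.startswith l "#")) (l := lines)]
      exact pv_A_skip _ _ htwall
    rw [hA]
    simp
  · cases hcase : lines.dropWhile (fun l => !(PySem.Str.startswith l "#")) with
    | nil => left; rfl
    | cons h' t' =>
      right
      refine ⟨h', t', rfl, ?_⟩
      simpa using pv_head_dropWhile _ lines h' t' hcase
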